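-- pv_equiv track=rewrite | github.com/JoaKnut/Arithmetic-Resonance-Omega-T | scripts/05_abc_tension.py | calcular_omega_fast
-- ===== SOURCE A (Python) =====
-- import math
--
-- def calcular_omega_fast(n):
--     # Implementación rápida de d(2n)-4
--     if n == 1: return -2
--     m = 2 * n
--     divs = 0
--     for i in range(1, int(math.isqrt(m)) + 1):
--         if m % i == 0:
--             divs += 1
--             if i*i != m: divs += 1
--     return divs - 4
-- ===== SOURCE B (Python) =====
-- def calcular_omega_fast(n):
--     # d(2n) - 4 via trial-division prime factorization: d(m) = prod over primes (e_p + 1)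
--     m = 2 * n
--     result = 1
--     p = 2
--     while p * p <= m:
--         if m % p == 0:
--             e = 0
--             while m % p == 0:
--                 m //= p
--                 e += 1
--             result *= e + 1
--         p += 1
--     if m > 1:
--         result *= 2
--     return result - 4
-- ===== Notes on version B (the rewrite author's own statement) =====
-- stated objective: alternative
-- what changed: B computes d(2n) by trial-division prime factorization (dividing each found prime out while counting its exponent and multiplying exponent+1, with a factor 2 for a leftover prime cofactor) instead of A's divisor-pair counting scan over every i up to isqrt(2n).
-- outside the precondition, e.g. on calcular_omega_fast(0): A returns -4, B returns -3; on calcular_omega_fast(-3): A raises ValueError, B returns -3; on calcular_omega_fast(-4): A raises ValueError, B returns -3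
import Mathlib
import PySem

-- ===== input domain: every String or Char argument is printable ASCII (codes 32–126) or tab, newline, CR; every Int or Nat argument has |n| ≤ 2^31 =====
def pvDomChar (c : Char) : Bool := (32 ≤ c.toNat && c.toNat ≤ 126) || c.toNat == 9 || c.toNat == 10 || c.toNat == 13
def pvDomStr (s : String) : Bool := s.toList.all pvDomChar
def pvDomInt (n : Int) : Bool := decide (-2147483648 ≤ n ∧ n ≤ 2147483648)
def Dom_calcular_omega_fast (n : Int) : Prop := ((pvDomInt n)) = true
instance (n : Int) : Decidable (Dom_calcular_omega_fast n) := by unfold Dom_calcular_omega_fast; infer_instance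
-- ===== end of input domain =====

-- B replaces A's divisor-pair counting scan up to isqrt(2n) by trial-division prime
-- factorization of 2n (objective: alternative algorithm, same worst-case cost).

-- ===== PORT A =====
-- Faithful for n ≥ 0 (math.isqrt raises ValueError on negative input; Pre_ excludes it,
-- the port renders it through toNat). The loop is Python's
-- `for i in range(1, isqrt(m)+1)` with the same two conditional increments.
def calcular_omega_fast (n : Int) : Int :=
  if n = 1 then -2
  else
    let m := (2 * n).toNat
    let divs : Nat := (List.range' 1 (Nat.sqrt m)).foldl
      (fun divs i =>
        if m % i = 0 then
          let divs := divs + 1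
          if i * i ≠ m then divs + 1 else divs
        else divs) 0
    (divs : Int) - 4

-- ===== PORT B =====
-- B's inner `while m % p == 0: m //= p; e += 1` (the 0 < m and 1 < p guards only make it total)
def pvDivOut (m p e : Nat) : Nat × Nat :=
  if h : 0 < m ∧ 1 < p ∧ m % p = 0 then pvDivOut (m / p) p (e + 1) else (m, e)
  termination_by m
  decreasing_by exact Nat.div_lt_self h.1 h.2.1

-- needed by pvFactorLoop's termination argument
theorem pvDivOut_fst_le (m p e : Nat) : (pvDivOut m p e).1 ≤ m := by
  fun_induction pvDivOut with
  | case1 m e h ih => exact le_trans ih (Nat.div_le_self m p)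
  | case2 => exact le_refl _

-- B's outer `while p * p <= m` loop; returns (reduced m, result); 2 ≤ p only for totality
def pvFactorLoop (m p result : Nat) : Nat × Nat :=
  if h : p * p ≤ m ∧ 2 ≤ p then
    if m % p = 0 then
      let r := pvDivOut m p 0
      pvFactorLoop r.1 (p + 1) (result * (r.2 + 1))
    else pvFactorLoop m (p + 1) result
  else (m, result)
  termination_by m + 2 - p
  decreasing_by
  · have h1 := pvDivOut_fst_le m p 0
    have h2 : p ≤ p * p := Nat.le_mul_of_pos_left p (by omega)
    omega
  · have h2 : p ≤ p * p := Nat.le_mul_of_pos_left p (by omega)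
    omega

def calcular_omega_fast_alt (n : Int) : Int :=
  let m := (2 * n).toNat
  let r := pvFactorLoop m 2 1
  let result := if 1 < r.1 then r.2 * 2 else r.2
  (result : Int) - 4

-- ===== PRECONDITION & SPEC =====
-- Pre_ excludes n < 0, where math.isqrt makes A raise ValueError, and n = 0, where
-- d(0) is undefined and A's -4 (empty divisor scan) and B's -3 (empty factorization)
-- are both accidental values of their loop state.
def Pre_calcular_omega_fast (n : Int) : Prop := 1 ≤ n
instance (n : Int) : Decidable (Pre_calcular_omega_fast n) := by unfold Pre_calcular_omega_fast; infer_instance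
def pvWitness_calcular_omega_fast : Int := (6)

def Spec_calcular_omega_fast (n : Int) (out : Int) : Prop := out = calcular_omega_fast_alt n
instance (n : Int) (out : Int) : Decidable (Spec_calcular_omega_fast n out) := by unfold Spec_calcular_omega_fast; infer_instance

-- ===== CLAIM (what is proved, stated in full; the proofs are below) =====
def Claim_equal_calcular_omega_fast : Prop := ∀ (n : Int), Dom_calcular_omega_fast n → Pre_calcular_omega_fast n → Spec_calcular_omega_fast n (calcular_omega_fast n)

-- ===== LEMMAS AND PROOFS =====

-- the per-index contribution of A's loop body
def pvG (m i : Nat) : Nat := if m % i = 0 then (if i * i ≠ m then 2 else 1) else 0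

theorem pvFoldl_eq_sum (m : Nat) : ∀ (k a : Nat),
    (List.range' 1 k).foldl
      (fun divs i =>
        if m % i = 0 then
          if i * i ≠ m then divs + 1 + 1 else divs + 1
        else divs) a = a + ∑ i ∈ Finset.Icc 1 k, pvG m i := by
  intro k
  induction k with
  | zero => intro a; simp
  | succ k ih =>
    intro a
    rw [List.range'_1_concat, List.foldl_append, ih, Finset.sum_Icc_succ_top (by omega)]
    simp only [List.foldl_cons, List.foldl_nil, pvG, Nat.add_comm 1 k]
    split_ifs <;> omega

-- (a) small non-square-root divisor pairs to a large one
theorem pvPair_large {m d : Nat} (hm : 0 < m) (hd : d ∣ m) (h1 : d ≤ Nat.sqrt m)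
    (h2 : d * d ≠ m) : Nat.sqrt m < m / d := by
  by_contra hc
  rw [Nat.not_lt] at hc
  have hd0 : 0 < d := Nat.pos_of_dvd_of_pos hd hm
  have hmd : d * (m / d) = m := Nat.mul_div_cancel' hd
  have hs : Nat.sqrt m * Nat.sqrt m ≤ m := Nat.sqrt_le m
  have hq0 : 0 < m / d := Nat.div_pos (Nat.le_of_dvd hm hd) hd0
  -- d ≤ √m, m/d ≤ √m, d*(m/d) = m ≥ √m*√m forces d = √m and m/d = √m
  have h3 : d * (m / d) ≤ Nat.sqrt m * Nat.sqrt m := Nat.mul_le_mul h1 hc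
  have heq : Nat.sqrt m * Nat.sqrt m = m := by omega
  have hdeq : d = Nat.sqrt m := by
    rcases Nat.lt_or_ge d (Nat.sqrt m) with hlt | hge
    · exfalso
      have : d * (m / d) < Nat.sqrt m * (m / d) := (Nat.mul_lt_mul_right hq0).mpr hlt
      have : Nat.sqrt m * (m / d) ≤ Nat.sqrt m * Nat.sqrt m := Nat.mul_le_mul_left _ hc
      omega
    · omega
  have hq : m / d = Nat.sqrt m := by
    have hcancel : d * (m / d) = d * Nat.sqrt m := by rw [hmd, hdeq, heq]
    exact Nat.eq_of_mul_eq_mul_left hd0 hcancel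
  exact h2 (by rw [hdeq]; exact heq)

-- (b) a large divisor maps back to a small non-square-root one
theorem pvPair_small {m D : Nat} (hm : 0 < m) (hD : D ∣ m) (h1 : Nat.sqrt m < D) :
    m / D ≤ Nat.sqrt m ∧ ¬ (m / D) * (m / D) = m := by
  have hD0 : 0 < D := by omega
  have hlt : m < (Nat.sqrt m + 1) * D := by
    calc m < (Nat.sqrt m + 1) * (Nat.sqrt m + 1) := Nat.lt_succ_sqrt m
    _ ≤ (Nat.sqrt m + 1) * D := Nat.mul_le_mul_left _ (by omega)
  have hle : m / D ≤ Nat.sqrt m := by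
    have h5 : m / D < Nat.sqrt m + 1 := (Nat.div_lt_iff_lt_mul hD0).mpr hlt
    omega
  refine ⟨hle, fun hsq => ?_⟩
  have hd0 : 0 < m / D := by
    rcases Nat.eq_zero_or_pos (m / D) with h | h
    · rw [h] at hsq; omega
    · exact h
  have hDc : D * (m / D) = m := Nat.mul_div_cancel' hD
  have hmix : D * (m / D) = (m / D) * (m / D) := by rw [hDc, hsq]
  have hDeq : D = m / D := Nat.eq_of_mul_eq_mul_right hd0 hmix
  omega

theorem pvSum_eq_card (m : Nat) (hm : 0 < m) :
    ∑ i ∈ Finset.Icc 1 (Nat.sqrt m), pvG m i = m.divisors.card := by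
  have hsplit : ∀ i, pvG m i = (if i ∣ m then 1 else 0) + (if i ∣ m ∧ i * i ≠ m then 1 else 0) := by
    intro i
    unfold pvG
    by_cases h : i ∣ m
    · simp only [Nat.mod_eq_zero_of_dvd h, if_pos h]
      by_cases h2 : i * i ≠ m <;> simp [h, h2]
    · have : m % i ≠ 0 := fun hc => h (Nat.dvd_of_mod_eq_zero hc)
      simp [this, h]
  rw [Finset.sum_congr rfl (fun i _ => hsplit i), Finset.sum_add_distrib]
  rw [← Finset.card_filter, ← Finset.card_filter]
  -- first filter = small divisors
  have e1 : (Finset.Icc 1 (Nat.sqrt m)).filter (fun i => i ∣ m)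
      = m.divisors.filter (fun d => d ≤ Nat.sqrt m) := by
    ext d
    simp only [Finset.mem_filter, Finset.mem_Icc, Nat.mem_divisors]
    constructor
    · rintro ⟨⟨h1, h2⟩, h3⟩; exact ⟨⟨h3, by omega⟩, h2⟩
    · rintro ⟨⟨h1, h2⟩, h3⟩
      exact ⟨⟨Nat.pos_of_dvd_of_pos h1 hm, h3⟩, h1⟩
  -- second filter ↔ large divisors via d ↦ m / d
  have e2 : ((Finset.Icc 1 (Nat.sqrt m)).filter (fun i => i ∣ m ∧ i * i ≠ m)).card
      = (m.divisors.filter (fun d => ¬ d ≤ Nat.sqrt m)).card := by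
    apply Finset.card_bij' (fun d _ => m / d) (fun D _ => m / D)
    · intro d hd
      simp only [Finset.mem_filter, Finset.mem_Icc, Nat.mem_divisors] at hd ⊢
      obtain ⟨⟨hd1, hd2⟩, hdvd, hsq⟩ := hd
      refine ⟨⟨Nat.div_dvd_of_dvd hdvd, by omega⟩, ?_⟩
      have := pvPair_large hm hdvd hd2 hsq
      omega
    · intro D hD
      simp only [Finset.mem_filter, Finset.mem_Icc, Nat.mem_divisors] at hD ⊢
      obtain ⟨⟨hdvd, _⟩, hlarge⟩ := hD
      have hb := pvPair_small hm hdvd (by omega)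
      refine ⟨⟨Nat.div_pos (Nat.le_of_dvd hm hdvd) (by have := Nat.pos_of_dvd_of_pos hdvd hm; omega), hb.1⟩, Nat.div_dvd_of_dvd hdvd, hb.2⟩
    · intro d hd
      simp only [Finset.mem_filter, Finset.mem_Icc] at hd
      exact Nat.div_div_self hd.2.1 (by omega)
    · intro D hD
      simp only [Finset.mem_filter, Nat.mem_divisors] at hD
      exact Nat.div_div_self hD.1.1 (by omega)
  rw [e1, e2, Finset.card_filter_add_card_filter_not]

theorem pvDivOut_spec (m p e : Nat) (hm : 0 < m) (hp : 1 < p) :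
    m = p ^ ((pvDivOut m p e).2 - e) * (pvDivOut m p e).1 ∧
      ¬ p ∣ (pvDivOut m p e).1 ∧ 0 < (pvDivOut m p e).1 ∧ e ≤ (pvDivOut m p e).2 := by
  fun_induction pvDivOut with
  | case1 m e h ih =>
    have hdvd : p ∣ m := Nat.dvd_of_mod_eq_zero h.2.2
    have hmp : 0 < m / p := Nat.div_pos (Nat.le_of_dvd h.1 hdvd) (by omega)
    obtain ⟨h1, h2, h3, h4⟩ := ih hmp
    refine ⟨?_, h2, h3, by omega⟩
    have hpow : p ^ ((pvDivOut (m / p) p (e + 1)).2 - e)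
        = p * p ^ ((pvDivOut (m / p) p (e + 1)).2 - (e + 1)) := by
      rw [← pow_succ']
      congr 1
      omega
    rw [hpow, Nat.mul_assoc, ← h1, Nat.mul_div_cancel' hdvd]
  | case2 m e h =>
    have : ¬ p ∣ m := fun hd => h ⟨hm, hp, Nat.mod_eq_zero_of_dvd hd⟩
    exact ⟨by simp, this, hm, le_refl e⟩

theorem pvCard_divisors_pow {p : Nat} (k : Nat) (pp : p.Prime) :
    (p ^ k).divisors.card = k + 1 := by
  rw [Nat.divisors_prime_pow pp, Finset.card_map, Finset.card_range]

theorem pvFactorLoop_spec (m p result : Nat) :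
    0 < m → 2 ≤ p → (∀ q, q.Prime → q ∣ m → p ≤ q) →
    0 < (pvFactorLoop m p result).1 ∧
      (∀ q, q.Prime → q ∣ (pvFactorLoop m p result).1 → (pvFactorLoop m p result).1 < q * q) ∧
      (pvFactorLoop m p result).2 * (pvFactorLoop m p result).1.divisors.card
        = result * m.divisors.card := by
  fun_induction pvFactorLoop m p result with
  | case1 m p result h hmod r ih =>
    intro hm hp hfac
    have hpdvd : p ∣ m := Nat.dvd_of_mod_eq_zero hmod
    have pp : p.Prime := Nat.prime_def_minFac.mpr
      ⟨h.2, Nat.le_antisymm (Nat.minFac_le (by omega))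
        (hfac _ (Nat.minFac_prime (by omega)) (dvd_trans (Nat.minFac_dvd p) hpdvd))⟩
    obtain ⟨h1, h2, h3, h4⟩ := pvDivOut_spec m p 0 hm (by omega)
    rw [Nat.sub_zero] at h1
    have hr : r = pvDivOut m p 0 := rfl
    rw [← hr] at h1 h2 h3
    have hm'dvd : r.1 ∣ m := ⟨p ^ r.2, by rw [h1]; ring⟩
    have hcop : Nat.Coprime (p ^ r.2) r.1 :=
      Nat.Coprime.pow_left _ ((Nat.Prime.coprime_iff_not_dvd pp).mpr h2)
    have hcard : m.divisors.card = (r.2 + 1) * r.1.divisors.card := by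
      rw [h1, Nat.Coprime.card_divisors_mul hcop, pvCard_divisors_pow _ pp]
    have hfac' : ∀ q, q.Prime → q ∣ r.1 → p + 1 ≤ q := by
      intro q hq hqd
      have hqm : q ∣ m := dvd_trans hqd hm'dvd
      have := hfac q hq hqm
      have hne : q ≠ p := fun he => h2 (he ▸ hqd)
      omega
    obtain ⟨c1, c2, c3⟩ := ih h3 (by omega) hfac'
    exact ⟨c1, c2, by rw [c3, hcard]; ring⟩
  | case2 m p result h hmod ih =>
    intro hm hp hfac
    refine ih hm (by omega) ?_
    intro q hq hqd
    have := hfac q hq hqd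
    have hne : q ≠ p := fun he => hmod (Nat.mod_eq_zero_of_dvd (he ▸ hqd))
    omega
  | case3 m p result h =>
    intro hm hp hfac
    have hlt : m < p * p := by
      rcases Nat.lt_or_ge m (p * p) with h' | h'
      · exact h'
      · exact absurd ⟨h', hp⟩ h
    refine ⟨hm, ?_, rfl⟩
    intro q hq hqd
    have hpq := hfac q hq hqd
    calc m < p * p := hlt
    _ ≤ q * q := Nat.mul_le_mul hpq hpq

theorem pvAlt_eq_card (m : Nat) (hm : 0 < m) :
    (if 1 < (pvFactorLoop m 2 1).1 then (pvFactorLoop m 2 1).2 * 2 else (pvFactorLoop m 2 1).2)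
      = m.divisors.card := by
  obtain ⟨c1, c2, c3⟩ := pvFactorLoop_spec m 2 1 hm (le_refl 2) (fun q hq _ => hq.two_le)
  by_cases h : 1 < (pvFactorLoop m 2 1).1
  · have pp : (pvFactorLoop m 2 1).1.Prime := by
      by_contra hnp
      have hsq := Nat.minFac_sq_le_self c1 hnp
      have hmf : (pvFactorLoop m 2 1).1.minFac.Prime := Nat.minFac_prime (by omega)
      have := c2 _ hmf (Nat.minFac_dvd _)
      rw [Nat.pow_two] at hsq
      omega
    have hd : (pvFactorLoop m 2 1).1.divisors.card = 2 := by
      rw [pp.divisors, Finset.card_pair (by have := pp.two_le; omega)]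
    rw [if_pos h]
    rw [hd] at c3
    omega
  · have h1 : (pvFactorLoop m 2 1).1 = 1 := by omega
    rw [if_neg h]
    rw [h1] at c3
    simpa using c3

-- ===== VERDICT (by name: the statement is the Claim_ definition above) =====
theorem calcular_omega_fast_spec : Claim_equal_calcular_omega_fast := by
  intro n _ hpre
  unfold Pre_calcular_omega_fast at hpre
  have hM : 0 < (2 * n).toNat := by omega
  have hB := pvAlt_eq_card ((2 * n).toNat) hM
  unfold Spec_calcular_omega_fast
  simp only [calcular_omega_fast, calcular_omega_fast_alt]
  rw [hB]
  by_cases hn : n = 1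
  · subst hn
    rw [if_pos rfl]
    norm_num
    decide
  · rw [if_neg hn]
    rw [pvFoldl_eq_sum, pvSum_eq_card _ hM]
    simp
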